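-- pv_equiv track=rewrite | github.com/GauranshBansal07/EightFold-x-AI-Club-Team-Infosys-Bandars- | interview/strategist.py | _get_plateau_strategy
-- ===== SOURCE A (Python) =====
-- def _get_plateau_strategy(probe_history: list) -> str:
--     """Pick an escalation strategy for plateau breaking aggressively."""
--     used = set()
--     for p in probe_history:
--         s = p.get("follow_up_strategy", "")
--         if s in ("contradiction_test", "failure_mode_exploration", "quantification_attack"):
--             used.add(s)
--
--     for strategy in ["contradiction_test", "failure_mode_exploration", "quantification_attack"]:
--         if strategy not in used:
--             return strategy
--     return "contradiction_test"
-- ===== SOURCE B (Python) =====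
-- # Single pass ORs each seen strategy into a 3-bit mask; an 8-entry lookup
-- # table precomputed over all masks gives the answer with no priority scan.
-- _BITS = {"contradiction_test": 1, "failure_mode_exploration": 2, "quantification_attack": 4}
--
-- _TABLE = [
--     "contradiction_test",        # 0b000: none used
--     "failure_mode_exploration",  # 0b001: contradiction used
--     "contradiction_test",        # 0b010
--     "quantification_attack",     # 0b011: first two used
--     "contradiction_test",        # 0b100
--     "failure_mode_exploration",  # 0b101
--     "contradiction_test",        # 0b110
--     "contradiction_test",        # 0b111: all used -> fallback
-- ]
--
-- def _get_plateau_strategy(probe_history: list) -> str: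
--     """Pick an escalation strategy for plateau breaking aggressively."""
--     mask = 0
--     for p in probe_history:
--         mask |= _BITS.get(p.get("follow_up_strategy", ""), 0)
--     return _TABLE[mask]
-- ===== Notes on version B (the rewrite author's own statement) =====
-- stated objective: alternative
-- what changed: Replaced A's set accumulation plus priority-list scan by a single pass that ORs each seen strategy into a 3-bit mask and then returns the answer from an 8-entry precomputed lookup table indexed by the mask.
import Mathlib
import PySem

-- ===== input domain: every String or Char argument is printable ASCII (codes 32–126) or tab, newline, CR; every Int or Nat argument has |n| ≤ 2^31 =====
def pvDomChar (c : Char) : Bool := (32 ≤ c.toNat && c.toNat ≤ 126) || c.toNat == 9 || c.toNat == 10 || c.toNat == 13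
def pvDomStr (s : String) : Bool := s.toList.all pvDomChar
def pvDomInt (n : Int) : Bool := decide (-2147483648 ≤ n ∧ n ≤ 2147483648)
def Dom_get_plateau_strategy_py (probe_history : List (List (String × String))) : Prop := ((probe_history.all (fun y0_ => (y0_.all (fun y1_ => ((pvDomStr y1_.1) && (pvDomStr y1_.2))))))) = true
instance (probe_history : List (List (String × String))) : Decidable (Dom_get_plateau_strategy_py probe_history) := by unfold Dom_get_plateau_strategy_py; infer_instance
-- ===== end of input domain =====

-- B replaces A's used-set pre-pass + priority scan by a single pass ORing strategies into a
-- 3-bit mask and an 8-entry precomputed lookup table indexed by the mask (alternative, same cost).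
-- ===== PORT A =====
def pvUsedA (probe_history : List (List (String × String))) : PySem.Set String :=
  probe_history.foldl (fun used p =>
    let s := PySem.Dict.getD (PySem.Dict.mk p) "follow_up_strategy" ""
    if s = "contradiction_test" ∨ s = "failure_mode_exploration" ∨ s = "quantification_attack"
    then PySem.Set.add used s else used) PySem.Set.empty

def pvPickA (used : PySem.Set String) : List String → String
  | [] => "contradiction_test"
  | st :: rest => if PySem.Set.contains used st then pvPickA used rest else st

def get_plateau_strategy_py (probe_history : List (List (String × String))) : String :=
  pvPickA (pvUsedA probe_history)
    ["contradiction_test", "failure_mode_exploration", "quantification_attack"]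

-- ===== PORT B =====
-- exact port of _BITS.get(s, 0): the three keys are distinct literals, so the dict lookup
-- is this chain of equality tests with default 0
def pvBits (s : String) : Nat :=
  if s = "contradiction_test" then 1
  else if s = "failure_mode_exploration" then 2
  else if s = "quantification_attack" then 4
  else 0

def pvTable : List String :=
  ["contradiction_test", "failure_mode_exploration", "contradiction_test", "quantification_attack",
   "contradiction_test", "failure_mode_exploration", "contradiction_test", "contradiction_test"]

def pvMask (probe_history : List (List (String × String))) : Nat :=
  probe_history.foldl
    (fun m p => m ||| pvBits (PySem.Dict.getD (PySem.Dict.mk p) "follow_up_strategy" "")) 0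

-- _TABLE[mask]: mask < 8 always (OR of values ≤ 7), so getD never takes the default
def get_plateau_strategy_py_alt (probe_history : List (List (String × String))) : String :=
  pvTable.getD (pvMask probe_history) "contradiction_test"

-- ===== PRECONDITION & SPEC =====
def Spec_get_plateau_strategy_py (probe_history : List (List (String × String))) (out : String) : Prop := out = get_plateau_strategy_py_alt probe_history
instance (probe_history : List (List (String × String))) (out : String) : Decidable (Spec_get_plateau_strategy_py probe_history out) := by unfold Spec_get_plateau_strategy_py; infer_instance

-- ===== CLAIM (what is proved, stated in full; the proofs are below) =====
def Claim_equal_get_plateau_strategy_py : Prop := ∀ (probe_history : List (List (String × String))), Dom_get_plateau_strategy_py probe_history → Spec_get_plateau_strategy_py probe_history (get_plateau_strategy_py probe_history)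

-- ===== LEMMAS AND PROOFS =====
-- 'some probe's follow_up_strategy equals st' — the common characterisation both ports are reduced to
def pvStrategyUsed (probe_history : List (List (String × String))) (strategy : String) : Bool :=
  probe_history.any (fun p => PySem.Dict.getD (PySem.Dict.mk p) "follow_up_strategy" "" == strategy)

-- (x ∈ s.add y) as a Bool equation; specific to the accumulator shape of A's loop
lemma contains_add (s : PySem.Set String) (x y : String) :
    PySem.Set.contains (PySem.Set.add s x) y = (PySem.Set.contains s y || (x == y)) := by
  show List.contains _ _ = _
  unfold PySem.Set.add
  split_ifs with h
  · show List.contains s y = _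
    rcases hx : x == y
    · simp
    · have hm : y ∈ (s : List String) := by
        have := beq_iff_eq.mp hx; subst this
        exact List.contains_iff_mem.mp (by exact h)
      simp [hm]
  · show List.contains (s ++ [x]) y = _
    rw [List.contains_append]
    congr 1
    rcases hx : x == y <;> rcases hy : y == x <;> simp_all

-- loop invariant of A's first pass, for the three candidate strategies
lemma contains_usedA_aux (probe_history : List (List (String × String)))
    (acc : PySem.Set String) (st : String)
    (hst : st = "contradiction_test" ∨ st = "failure_mode_exploration" ∨ st = "quantification_attack") :
    PySem.Set.contains (probe_history.foldl (fun used p =>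
      let s := PySem.Dict.getD (PySem.Dict.mk p) "follow_up_strategy" ""
      if s = "contradiction_test" ∨ s = "failure_mode_exploration" ∨ s = "quantification_attack"
      then PySem.Set.add used s else used) acc) st
    = (PySem.Set.contains acc st || pvStrategyUsed probe_history st) := by
  induction probe_history generalizing acc with
  | nil => simp [pvStrategyUsed]
  | cons p rest ih =>
    rw [List.foldl_cons, ih]
    have hsplit : pvStrategyUsed (p :: rest) st
        = ((PySem.Dict.getD (PySem.Dict.mk p) "follow_up_strategy" "" == st)
            || pvStrategyUsed rest st) := by
      simp [pvStrategyUsed]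
    rw [hsplit]
    dsimp only
    by_cases hcase : PySem.Dict.getD (PySem.Dict.mk p) "follow_up_strategy" "" = "contradiction_test"
        ∨ PySem.Dict.getD (PySem.Dict.mk p) "follow_up_strategy" "" = "failure_mode_exploration"
        ∨ PySem.Dict.getD (PySem.Dict.mk p) "follow_up_strategy" "" = "quantification_attack"
    · rw [if_pos hcase, contains_add]
      cases PySem.Set.contains acc st <;> simp [Bool.or_comm]
    · rw [if_neg hcase]
      have hne : (PySem.Dict.getD (PySem.Dict.mk p) "follow_up_strategy" "" == st) = false := by
        rcases hst with rfl | rfl | rfl <;> simp_all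
      simp [hne]

lemma contains_usedA (probe_history : List (List (String × String))) (st : String)
    (hst : st = "contradiction_test" ∨ st = "failure_mode_exploration" ∨ st = "quantification_attack") :
    PySem.Set.contains (pvUsedA probe_history) st = pvStrategyUsed probe_history st := by
  unfold pvUsedA
  rw [contains_usedA_aux probe_history PySem.Set.empty st hst]
  rfl

-- B's fold: the accumulator ORs out of the loop
lemma mask_acc (probe_history : List (List (String × String))) (acc : Nat) :
    probe_history.foldl
      (fun m p => m ||| pvBits (PySem.Dict.getD (PySem.Dict.mk p) "follow_up_strategy" "")) acc
    = acc ||| pvMask probe_history := by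
  induction probe_history generalizing acc with
  | nil => simp [pvMask]
  | cons p rest ih =>
    rw [List.foldl_cons, ih]
    conv_rhs => rw [pvMask, List.foldl_cons, ih]
    simp [Nat.or_assoc]

-- B's mask is exactly the three 'used' bits
lemma mask_eq (probe_history : List (List (String × String))) :
    pvMask probe_history
    = (cond (pvStrategyUsed probe_history "contradiction_test") 1 0)
      ||| (cond (pvStrategyUsed probe_history "failure_mode_exploration") 2 0)
      ||| (cond (pvStrategyUsed probe_history "quantification_attack") 4 0) := by
  induction probe_history with
  | nil => simp [pvMask, pvStrategyUsed]
  | cons p rest ih =>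
    have hc : pvMask (p :: rest)
        = pvBits (PySem.Dict.getD (PySem.Dict.mk p) "follow_up_strategy" "") ||| pvMask rest := by
      rw [pvMask, List.foldl_cons, mask_acc]; simp
    have hu : ∀ st, pvStrategyUsed (p :: rest) st
        = ((PySem.Dict.getD (PySem.Dict.mk p) "follow_up_strategy" "" == st)
            || pvStrategyUsed rest st) := by
      intro st; simp [pvStrategyUsed]
    rw [hc, ih, hu, hu, hu]
    generalize PySem.Dict.getD (PySem.Dict.mk p) "follow_up_strategy" "" = s
    by_cases h1 : s = "contradiction_test"
    · subst h1
      cases pvStrategyUsed rest "contradiction_test" <;>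
        cases pvStrategyUsed rest "failure_mode_exploration" <;>
          cases pvStrategyUsed rest "quantification_attack" <;>
            simp [pvBits] <;> decide
    · by_cases h2 : s = "failure_mode_exploration"
      · subst h2
        cases pvStrategyUsed rest "contradiction_test" <;>
          cases pvStrategyUsed rest "failure_mode_exploration" <;>
            cases pvStrategyUsed rest "quantification_attack" <;>
              simp [pvBits] <;> decide
      · by_cases h3 : s = "quantification_attack"
        · subst h3
          cases pvStrategyUsed rest "contradiction_test" <;>
            cases pvStrategyUsed rest "failure_mode_exploration" <;>
              cases pvStrategyUsed rest "quantification_attack" <;>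
                simp [pvBits] <;> decide
        · have hb : pvBits s = 0 := by simp [pvBits, h1, h2, h3]
          have he1 : (s == "contradiction_test") = false := by simp [h1]
          have he2 : (s == "failure_mode_exploration") = false := by simp [h2]
          have he3 : (s == "quantification_attack") = false := by simp [h3]
          simp [hb, he1, he2, he3]

-- ===== VERDICT (by name: the statement is the Claim_ definition above) =====
theorem get_plateau_strategy_py_spec : Claim_equal_get_plateau_strategy_py := by
  intro h _
  show get_plateau_strategy_py h = get_plateau_strategy_py_alt h
  rw [get_plateau_strategy_py, get_plateau_strategy_py_alt, mask_eq]
  simp only [pvPickA,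
    contains_usedA h _ (Or.inl rfl),
    contains_usedA h _ (Or.inr (Or.inl rfl)),
    contains_usedA h _ (Or.inr (Or.inr rfl))]
  cases pvStrategyUsed h "contradiction_test" <;>
    cases pvStrategyUsed h "failure_mode_exploration" <;>
      cases pvStrategyUsed h "quantification_attack" <;>
        simp [pvTable]
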